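-- pv_equiv track=rewrite | github.com/jonhayes37/iu-bot | iu/triggers/roles.py | _get_intent_from_message
-- ===== SOURCE A (Python) =====
-- def _get_intent_from_message(content: str) -> tuple[str, str]:
--     add_prefixes = ("add ", "+")
--     remove_prefixes = ("remove ", "-")
--
--     if content.startswith(add_prefixes):
--         intent = "add"
--         for prefix in add_prefixes:
--             if content.startswith(prefix):
--                 alias = content[len(prefix):].strip()
--                 return intent, alias
--     elif content.startswith(remove_prefixes):
--         intent = "remove"
--         for prefix in remove_prefixes:
--             if content.startswith(prefix):
--                 alias = content[len(prefix):].strip()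
--                 return intent, alias
--     return "", ""
-- ===== SOURCE B (Python) =====
-- def _get_intent_from_message(content: str) -> tuple[str, str]:
--     sign = content[:1]
--     if sign == "+":
--         return "add", content[1:].strip()
--     if sign == "-":
--         return "remove", content[1:].strip()
--     head, sep, tail = content.partition(" ")
--     if sep and head in ("add", "remove"):
--         return head, tail.strip()
--     return "", ""
-- ===== Notes on version B (the rewrite author's own statement) =====
-- stated objective: alternative
-- what changed: B parses by a one-character sign dispatch ('+'/'-' via content[:1]) plus str.partition at the first space whose first word is itself the intent, instead of A's two startswith-prefix-tuple guards each followed by an inner prefix-finding loop.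
import Mathlib
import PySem

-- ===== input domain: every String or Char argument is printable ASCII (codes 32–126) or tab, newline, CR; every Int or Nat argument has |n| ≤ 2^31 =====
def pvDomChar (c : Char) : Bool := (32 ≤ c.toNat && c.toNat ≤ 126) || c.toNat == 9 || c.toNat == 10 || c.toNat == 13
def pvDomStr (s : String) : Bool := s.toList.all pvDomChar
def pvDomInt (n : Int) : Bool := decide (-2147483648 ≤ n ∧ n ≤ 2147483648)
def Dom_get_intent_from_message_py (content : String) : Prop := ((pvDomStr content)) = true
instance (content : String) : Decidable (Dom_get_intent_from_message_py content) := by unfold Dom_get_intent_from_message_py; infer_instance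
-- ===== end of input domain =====

-- B decomposes the parse differently: a one-character sign dispatch ('+'/'-') plus a partition at the
-- first space whose first word IS the intent, instead of A's prefix-tuple guards with inner prefix loops (alternative decomposition).

-- ===== PORT A =====
-- inner 'for prefix in prefixes: if content.startswith(prefix): return intent, alias'
def pvFindAlias (content : String) : List String → Option String
  | [] => none
  | p :: rest =>
    if PySem.Str.startswith content p then
      some (PySem.Str.strip (PySem.Str.slice content (some (PySem.Str.len p)) none))
    else pvFindAlias content rest

def get_intent_from_message_py (content : String) : String × String :=
  let add_prefixes := ["add ", "+"]
  let remove_prefixes := ["remove ", "-"]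
  if add_prefixes.any (fun p => PySem.Str.startswith content p) then
    match pvFindAlias content add_prefixes with
    | some al => ("add", al)
    | none => ("", "")
  else if remove_prefixes.any (fun p => PySem.Str.startswith content p) then
    match pvFindAlias content remove_prefixes with
    | some al => ("remove", al)
    | none => ("", "")
  else ("", "")

-- ===== PORT B =====
-- exact hand port of str.partition with the space separator (PySem has no partition):
-- text before the first space, whether a space was found, text after it.
def pvPartitionSpace : List Char → List Char × Bool × List Char
  | [] => ([], false, [])
  | c :: rest =>
    if c = ' ' then ([], true, rest)
    else
      let r := pvPartitionSpace rest
      (c :: r.1, r.2.1, r.2.2)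

def get_intent_from_message_py_alt (content : String) : String × String :=
  let sign := PySem.Str.slice content none (some 1)
  if sign = "+" then ("add", PySem.Str.strip (PySem.Str.slice content (some 1) none))
  else if sign = "-" then ("remove", PySem.Str.strip (PySem.Str.slice content (some 1) none))
  else
    let r := pvPartitionSpace content.toList
    if r.2.1 && (r.1 = "add".toList || r.1 = "remove".toList) then
      (String.ofList r.1, String.ofList (PySem.Chars.strip r.2.2))
    else ("", "")

-- ===== PRECONDITION & SPEC =====
def Spec_get_intent_from_message_py (content : String) (out : String × String) : Prop := out = get_intent_from_message_py_alt content
instance (content : String) (out : String × String) : Decidable (Spec_get_intent_from_message_py content out) := by unfold Spec_get_intent_from_message_py; infer_instance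

-- ===== CLAIM (what is proved, stated in full; the proofs are below) =====
def Claim_equal_get_intent_from_message_py : Prop := ∀ (content : String), Dom_get_intent_from_message_py content → Spec_get_intent_from_message_py content (get_intent_from_message_py content)

-- ===== LEMMAS AND PROOFS =====

-- partitioning a word (no space) followed by ' ' :: t isolates exactly that word
theorem pvPartitionSpace_word (w t : List Char) (hw : ' ' ∉ w) :
    pvPartitionSpace (w ++ ' ' :: t) = (w, true, t) := by
  induction w with
  | nil => simp [pvPartitionSpace]
  | cons c cs ih =>
    simp only [List.mem_cons, not_or] at hw
    simp [pvPartitionSpace, Ne.symm hw.1, ih hw.2]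

theorem pvPartitionSpace_found (l : List Char) (h : (pvPartitionSpace l).2.1 = true) :
    l = (pvPartitionSpace l).1 ++ ' ' :: (pvPartitionSpace l).2.2 := by
  induction l with
  | nil => simp [pvPartitionSpace] at h
  | cons c cs ih =>
    by_cases hc : c = ' '
    · simp [pvPartitionSpace, hc]
    · simp only [pvPartitionSpace, if_neg hc] at h ⊢
      simpa using ih h

theorem pv_main (content : String) :
    get_intent_from_message_py content = get_intent_from_message_py_alt content := by
  unfold get_intent_from_message_py get_intent_from_message_py_alt
  by_cases hA : PySem.Chars.startswith content.toList ['a','d','d',' '] = true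
  · obtain ⟨t, ht⟩ := (PySem.Chars.startswith_iff content.toList ['a','d','d',' ']).mp hA
    have hlist : content.toList = 'a'::'d'::'d'::' '::t := by rw [← ht]; rfl
    have hsign : PySem.Str.slice content none (some 1) = "a" := by
      apply String.toList_inj.mp
      simp only [PySem.Str.slice, PySem.Chars.slice_eq_listSlice]
      rw [PySem.List.slice_to _ (by norm_num), hlist]
      rfl
    have hneP : PySem.Str.slice content none (some 1) ≠ "+" := by rw [hsign]; decide
    have hneM : PySem.Str.slice content none (some 1) ≠ "-" := by rw [hsign]; decide
    have hpart : pvPartitionSpace content.toList = (['a','d','d'], true, t) := by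
      rw [show content.toList = ['a','d','d'] ++ ' ' :: t from hlist]
      exact pvPartitionSpace_word _ _ (by decide)
    have halias : PySem.Str.strip (PySem.Str.slice content (some 4) none)
        = String.ofList (PySem.Chars.strip t) := by
      apply String.toList_inj.mp
      simp only [PySem.Str.strip, PySem.Str.slice, PySem.Chars.slice_eq_listSlice, String.toList_ofList]
      rw [PySem.List.slice_from _ (by norm_num), hlist]
      rfl
    simp [pvFindAlias, hA, hneP, hneM, hpart, halias]
  · by_cases hP : PySem.Chars.startswith content.toList ['+'] = true
    · have hsign : PySem.Str.slice content none (some 1) = "+" := by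
        obtain ⟨t, ht⟩ := (PySem.Chars.startswith_iff content.toList ['+']).mp hP
        have hlist : content.toList = '+'::t := by rw [← ht]; rfl
        apply String.toList_inj.mp
        simp only [PySem.Str.slice, PySem.Chars.slice_eq_listSlice]
        rw [PySem.List.slice_to _ (by norm_num), hlist]
        rfl
      simp [pvFindAlias, hA, hP, hsign]
    · by_cases hR : PySem.Chars.startswith content.toList ['r','e','m','o','v','e',' '] = true
      · obtain ⟨t, ht⟩ := (PySem.Chars.startswith_iff content.toList ['r','e','m','o','v','e',' ']).mp hR
        have hlist : content.toList = 'r'::'e'::'m'::'o'::'v'::'e'::' '::t := by rw [← ht]; rfl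
        have hsign : PySem.Str.slice content none (some 1) = "r" := by
          apply String.toList_inj.mp
          simp only [PySem.Str.slice, PySem.Chars.slice_eq_listSlice]
          rw [PySem.List.slice_to _ (by norm_num), hlist]
          rfl
        have hneP : PySem.Str.slice content none (some 1) ≠ "+" := by rw [hsign]; decide
        have hneM : PySem.Str.slice content none (some 1) ≠ "-" := by rw [hsign]; decide
        have hpart : pvPartitionSpace content.toList = (['r','e','m','o','v','e'], true, t) := by
          rw [show content.toList = ['r','e','m','o','v','e'] ++ ' ' :: t from hlist]
          exact pvPartitionSpace_word _ _ (by decide)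
        have halias : PySem.Str.strip (PySem.Str.slice content (some 7) none)
            = String.ofList (PySem.Chars.strip t) := by
          apply String.toList_inj.mp
          simp only [PySem.Str.strip, PySem.Str.slice, PySem.Chars.slice_eq_listSlice, String.toList_ofList]
          rw [PySem.List.slice_from _ (by norm_num), hlist]
          rfl
        simp [pvFindAlias, hA, hP, hR, hneP, hneM, hpart, halias]
      · by_cases hM : PySem.Chars.startswith content.toList ['-'] = true
        · have hsign : PySem.Str.slice content none (some 1) = "-" := by
            obtain ⟨t, ht⟩ := (PySem.Chars.startswith_iff content.toList ['-']).mp hM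
            have hlist : content.toList = '-'::t := by rw [← ht]; rfl
            apply String.toList_inj.mp
            simp only [PySem.Str.slice, PySem.Chars.slice_eq_listSlice]
            rw [PySem.List.slice_to _ (by norm_num), hlist]
            rfl
          simp [pvFindAlias, hA, hP, hR, hM, hsign]
        · have hsignP : PySem.Str.slice content none (some 1) ≠ "+" := by
            intro h
            apply hP
            have h2 := congrArg String.toList h
            simp only [PySem.Str.slice, PySem.Chars.slice_eq_listSlice, String.toList_ofList] at h2
            rw [PySem.List.slice_to _ (by norm_num)] at h2
            have hp := List.take_prefix (Int.toNat 1) content.toList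
            rw [h2] at hp
            exact (PySem.Chars.startswith_iff content.toList ['+']).mpr hp
          have hsignM : PySem.Str.slice content none (some 1) ≠ "-" := by
            intro h
            apply hM
            have h2 := congrArg String.toList h
            simp only [PySem.Str.slice, PySem.Chars.slice_eq_listSlice, String.toList_ofList] at h2
            rw [PySem.List.slice_to _ (by norm_num)] at h2
            have hp := List.take_prefix (Int.toNat 1) content.toList
            rw [h2] at hp
            exact (PySem.Chars.startswith_iff content.toList ['-']).mpr hp
          have hcond : ¬ ((pvPartitionSpace content.toList).2.1 = true ∧
              ((pvPartitionSpace content.toList).1 = ['a','d','d'] ∨ (pvPartitionSpace content.toList).1 = ['r','e','m','o','v','e'])) := by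
            rintro ⟨hfound, hw | hw⟩
            · apply hA
              have hsplit := pvPartitionSpace_found _ hfound
              rw [hw] at hsplit
              exact (PySem.Chars.startswith_iff content.toList ['a','d','d',' ']).mpr ⟨_, hsplit.symm⟩
            · apply hR
              have hsplit := pvPartitionSpace_found _ hfound
              rw [hw] at hsplit
              exact (PySem.Chars.startswith_iff content.toList ['r','e','m','o','v','e',' ']).mpr ⟨_, hsplit.symm⟩
          simp [hA, hP, hR, hM, hsignP, hsignM, hcond]

-- ===== VERDICT (by name: the statement is the Claim_ definition above) =====
theorem get_intent_from_message_py_spec : Claim_equal_get_intent_from_message_py := by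
  intro content _
  exact pv_main content
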